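-- pv_equiv track=rewrite | github.com/ammarhaiderz/Quantum_Circuits_DataSet_NLP | pipelines/latex_render/live_latex_extractor.py | _line_is_commented
-- ===== SOURCE A (Python) =====
-- def _line_is_commented(txt: str, idx: int) -> bool:
--     """Return True if position ``idx`` is on a commented line.
--
--     A line is considered commented when an unescaped ``%`` appears between the
--     line start and the provided index.
--
--     Parameters
--     ----------
--     txt : str
--         Full text being scanned.
--     idx : int
--         Character index into ``txt`` to test.
--
--     Returns
--     -------
--     bool
--         ``True`` when the position lies on a commented line; otherwise ``False``.
--     """
--     ls = txt.rfind('\n', 0, idx)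
--     start = ls + 1 if ls != -1 else 0
--     segment = txt[start:idx]
--     i = 0
--     while True:
--         p = segment.find('%', i)
--         if p == -1:
--             return False
--         back = 0
--         j = p - 1
--         while j >= 0 and segment[j] == '\\':
--             back += 1
--             j -= 1
--         if back % 2 == 0:
--             return True
--         i = p + 1
-- ===== SOURCE B (Python) =====
-- def _line_is_commented(txt: str, idx: int) -> bool:
--     ls = txt.rfind('\n', 0, idx)
--     start = ls + 1 if ls != -1 else 0
--     bs = 0  # length of the run of consecutive backslashes just before the current char
--     for c in txt[start:idx]:
--         if c == '\\':
--             bs += 1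
--         elif c == '%':
--             if bs % 2 == 0:
--                 return True
--             bs = 0
--         else:
--             bs = 0
--     return False
-- ===== Notes on version B (the rewrite author's own statement) =====
-- stated objective: simpler
-- what changed: Replaces A's repeated find('%')-then-backward-backslash-count loop with a single forward scan that maintains the running length of the current trailing-backslash run.
import Mathlib
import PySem

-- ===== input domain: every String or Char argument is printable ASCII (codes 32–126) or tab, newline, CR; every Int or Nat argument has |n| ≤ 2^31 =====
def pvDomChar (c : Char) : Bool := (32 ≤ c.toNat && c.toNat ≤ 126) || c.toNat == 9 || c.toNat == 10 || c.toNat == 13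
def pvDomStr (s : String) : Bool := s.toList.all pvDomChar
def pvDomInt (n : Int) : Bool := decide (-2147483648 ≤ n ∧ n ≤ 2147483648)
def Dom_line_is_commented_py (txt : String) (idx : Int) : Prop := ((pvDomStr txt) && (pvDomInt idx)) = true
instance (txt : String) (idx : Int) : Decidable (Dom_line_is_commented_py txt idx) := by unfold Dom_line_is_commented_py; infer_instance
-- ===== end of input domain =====

-- B replaces A's find('%')-then-backward-backslash-count loop with a single forward scan
-- keeping the running length of the current trailing-backslash run (objective: simpler).


-- ===== PORT A =====
-- inner while of A: backCountN cs (j+1) counts the backslashes at positions j, j-1, ... walking backward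
def backCountN (cs : List Char) : Nat → Nat
  | 0 => 0
  | k + 1 => if PySem.List.pyGetD cs ((k : Int)) ' ' = '\\' then 1 + backCountN cs k else 0

-- A starts its backward walk at j = p - 1 (an Int); j < 0 means the walk is over
def backCount (cs : List Char) (j : Int) : Nat := backCountN cs (j + 1).toNat

-- outer while True loop of A; r is only a structural bound on the number of iterations
-- (each iteration moves i past the found '%', so cs.length + 1 - i iterations always suffice:
-- the r = 0 branch is never reached from line_is_commented_py, see loopAGo_iff below)
def loopAGo (cs : List Char) : Nat → Nat → Bool
  | _, 0 => false
  | i, r + 1 =>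
    let p := PySem.Chars.findFrom cs ['%'] (i : Int) none
    if p = -1 then false
    else if backCount cs (p - 1) % 2 = 0 then true
    else loopAGo cs (p + 1).toNat r

def loopA (cs : List Char) (i : Nat) : Bool := loopAGo cs i (cs.length + 1 - i)

def line_is_commented_py (txt : String) (idx : Int) : Bool :=
  let ls := PySem.Str.rfindFrom txt "\n" 0 (some idx)
  let start := if ls ≠ -1 then ls + 1 else 0
  let segment := PySem.List.slice txt.toList (some start) (some idx)
  loopA segment 0

-- ===== PORT B =====
-- single forward scan; bs = length of the run of consecutive backslashes just before the current char
def loopB (cs : List Char) (bs : Nat) : Bool :=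
  match cs with
  | [] => false
  | c :: rest =>
    if c = '\\' then loopB rest (bs + 1)
    else if c = '%' then (if bs % 2 = 0 then true else loopB rest 0)
    else loopB rest 0

def line_is_commented_py_alt (txt : String) (idx : Int) : Bool :=
  let ls := PySem.Str.rfindFrom txt "\n" 0 (some idx)
  let start := if ls ≠ -1 then ls + 1 else 0
  let segment := PySem.List.slice txt.toList (some start) (some idx)
  loopB segment 0

-- ===== PRECONDITION & SPEC =====
def Spec_line_is_commented_py (txt : String) (idx : Int) (out : Bool) : Prop := out = line_is_commented_py_alt txt idx
instance (txt : String) (idx : Int) (out : Bool) : Decidable (Spec_line_is_commented_py txt idx out) := by unfold Spec_line_is_commented_py; infer_instance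

-- ===== CLAIM (what is proved, stated in full; the proofs are below) =====
def Claim_equal_line_is_commented_py : Prop := ∀ (txt : String) (idx : Int), Dom_line_is_commented_py txt idx → Spec_line_is_commented_py txt idx (line_is_commented_py txt idx)

-- ===== LEMMAS AND PROOFS =====

-- trail u = length of the maximal run of '\\' at the END of u
def trail : List Char → Nat
  | [] => 0
  | c :: u => if u.all (· = '\\') then u.length + (if c = '\\' then 1 else 0) else trail u

theorem trail_all {u : List Char} (h : u.all (· = '\\') = true) : trail u = u.length := by
  cases u with
  | nil => rfl
  | cons c u =>
    simp only [List.all_cons, Bool.and_eq_true, decide_eq_true_eq] at h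
    simp [trail, h.1, h.2]

theorem trail_append_singleton (u : List Char) (c : Char) :
    trail (u ++ [c]) = if c = '\\' then trail u + 1 else 0 := by
  induction u with
  | nil => by_cases hc : c = '\\' <;> simp [trail, hc]
  | cons a u ih =>
    by_cases hc : c = '\\'
    · subst hc
      by_cases hu : u.all (· = '\\') = true
      · have hall : ((u ++ ['\\']).all (· = '\\')) = true := by simp [List.all_append, hu]
        by_cases ha : a = '\\' <;>
          simp [trail, hall, hu, ha, List.length_append]
      · simp only [Bool.not_eq_true] at hu
        have hnall : ((u ++ ['\\']).all (· = '\\')) = false := by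
          simp [List.all_append, hu]
        simp [trail, hnall, hu, ih]
    · have hnall : ((u ++ [c]).all (· = '\\')) = false := by simp [List.all_append, hc]
      simp [trail, hnall, ih, hc]

-- bsAt cs bs p = the value B's bs has when the scan (started with bs) reaches position p
def bsAt (cs : List Char) (bs : Nat) : Nat → Nat
  | 0 => bs
  | p + 1 =>
    match cs with
    | [] => bs
    | c :: rest => bsAt rest (if c = '\\' then bs + 1 else 0) p

theorem bsAt_eq_trail (cs : List Char) (bs p : Nat) :
    bsAt cs bs p = trail (cs.take p) + (if (cs.take p).all (· = '\\') then bs else 0) := by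
  induction cs generalizing bs p with
  | nil => cases p <;> simp [bsAt, trail]
  | cons c rest ih =>
    cases p with
    | zero => simp [bsAt, trail]
    | succ p =>
      simp only [bsAt, List.take_succ_cons]
      rw [ih]
      by_cases hc : c = '\\'
      · by_cases hall : (rest.take p).all (· = '\\') = true
        · simp [trail, hall, hc, trail_all hall]
          omega
        · simp only [Bool.not_eq_true] at hall
          simp [trail, hall, hc]
      · have h2 : ((c :: rest.take p).all (· = '\\')) = false := by simp [hc]
        by_cases hall : (rest.take p).all (· = '\\') = true
        · simp [trail, hall, h2, hc, trail_all hall]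
        · simp only [Bool.not_eq_true] at hall
          simp [trail, hall, h2]

-- A's backward count equals the trailing-run length of the prefix before position p
theorem backCountN_eq_trail (cs : List Char) (p : Nat) (hp : p ≤ cs.length) :
    backCountN cs p = trail (cs.take p) := by
  induction p with
  | zero => simp [backCountN, trail]
  | succ p ih =>
    have hple : p < cs.length := by omega
    have htake : cs.take (p + 1) = cs.take p ++ [cs[p]] := List.take_succ_eq_append_getElem hple
    have hget : PySem.List.pyGetD cs ((p : Int)) ' ' = cs[p] := by
      simp [List.getElem?_eq_getElem hple]
    rw [backCountN, hget, htake, trail_append_singleton]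
    by_cases hc : cs[p] = '\\'
    · rw [if_pos hc, if_pos hc, ih (by omega)]
      omega
    · rw [if_neg hc, if_neg hc]

-- B's characterization
theorem loopB_iff (cs : List Char) (bs : Nat) :
    loopB cs bs = true ↔
      ∃ p : Nat, p < cs.length ∧ cs[p]? = some '%' ∧ bsAt cs bs p % 2 = 0 := by
  induction cs generalizing bs with
  | nil => simp [loopB]
  | cons c rest ih =>
    by_cases hc : c = '\\'
    · rw [loopB, if_pos hc, ih]
      constructor
      · rintro ⟨p, h1, h2, h3⟩
        exact ⟨p + 1, by simpa using h1, by simpa using h2, by simpa [bsAt, hc] using h3⟩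
      · rintro ⟨p, h1, h2, h3⟩
        cases p with
        | zero => simp [hc] at h2
        | succ p =>
          exact ⟨p, by simpa using h1, by simpa using h2, by simpa [bsAt, hc] using h3⟩
    · by_cases hpc : c = '%'
      · by_cases hbs : bs % 2 = 0
        · rw [loopB, if_neg hc, if_pos hpc, if_pos hbs]
          exact Iff.intro (fun _ => ⟨0, by simp, by simp [hpc], by simpa [bsAt]⟩) (fun _ => rfl)
        · rw [loopB, if_neg hc, if_pos hpc, if_neg hbs, ih]
          constructor
          · rintro ⟨p, h1, h2, h3⟩
            exact ⟨p + 1, by simpa using h1, by simpa using h2, by simpa [bsAt, hc] using h3⟩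
          · rintro ⟨p, h1, h2, h3⟩
            cases p with
            | zero => simp [bsAt] at h3; exact absurd h3 hbs
            | succ p =>
              exact ⟨p, by simpa using h1, by simpa using h2, by simpa [bsAt, hc] using h3⟩
      · rw [loopB, if_neg hc, if_neg hpc, ih]
        constructor
        · rintro ⟨p, h1, h2, h3⟩
          exact ⟨p + 1, by simpa using h1, by simpa using h2, by simpa [bsAt, hc] using h3⟩
        · rintro ⟨p, h1, h2, h3⟩
          cases p with
          | zero => simp at h2; exact absurd h2 hpc
          | succ p =>
            exact ⟨p, by simpa using h1, by simpa using h2, by simpa [bsAt, hc] using h3⟩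

-- a one-character list is a prefix of drop q iff cs[q] is that character
theorem prefix_drop_iff (cs : List Char) (q : Nat) (a : Char) :
    [a] <+: cs.drop q ↔ cs[q]? = some a := by
  constructor
  · rintro ⟨t, ht⟩
    have : (cs.drop q)[0]? = some a := by rw [← ht]; simp
    simpa [List.getElem?_drop] using this
  · intro h
    have hq : q < cs.length := by
      by_contra hge
      rw [List.getElem?_eq_none (by omega)] at h
      simp at h
    have hd : cs.drop q = a :: cs.drop (q + 1) := by
      have h2 := List.drop_eq_getElem_cons hq
      rwa [show cs[q] = a from by simpa [List.getElem?_eq_getElem hq] using h] at h2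
    exact ⟨cs.drop (q + 1), hd.symm⟩

-- A's characterization
theorem loopAGo_iff (cs : List Char) (r i : Nat) (hilen : i ≤ cs.length)
    (hr : cs.length + 1 ≤ i + r) :
    loopAGo cs i r = true ↔
      ∃ p : Nat, i ≤ p ∧ p < cs.length ∧ cs[p]? = some '%' ∧ trail (cs.take p) % 2 = 0 := by
  induction r generalizing i with
  | zero => omega
  | succ r ih =>
    rw [loopAGo]
    by_cases hp : PySem.Chars.findFrom cs ['%'] (i : Int) none = -1
    · rw [if_pos hp]
      simp only [Bool.false_eq_true, false_iff]
      rintro ⟨p, h1, h2, h3, _⟩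
      have hnin : ¬ ['%'] <:+: cs.drop i :=
        (PySem.Chars.findFrom_natCast_eq_neg_one_iff cs ['%'] i hilen).mp hp
      have hsuf : cs.drop p <:+ cs.drop i := by
        have h4 := List.drop_suffix (p - i) (cs.drop i)
        rwa [List.drop_drop, show i + (p - i) = p from by omega] at h4
      exact hnin (List.IsInfix.trans
        (List.IsPrefix.isInfix ((prefix_drop_iff cs p '%').mpr h3)) hsuf.isInfix)
    · rw [if_neg hp]
      set q := PySem.Chars.findFrom cs ['%'] (i : Int) none with hq
      have spec := PySem.Chars.findFrom_natCast_spec cs ['%'] i hilen hp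
      have hiq : (i : Int) ≤ q := spec.1
      have hpre : ['%'] <+: cs.drop q.toNat := spec.2.1
      have hmin : ∀ j : Nat, i ≤ j → j < q.toNat → cs[j]? ≠ some '%' := by
        intro j hij hjq hcon
        exact spec.2.2 j hij hjq ((prefix_drop_iff cs j '%').mpr hcon)
      have hgetq : cs[q.toNat]? = some '%' := (prefix_drop_iff cs q.toNat '%').mp hpre
      have hqlen : q.toNat < cs.length := by
        by_contra hge
        rw [List.getElem?_eq_none (by omega)] at hgetq
        simp at hgetq
      have hiqn : i ≤ q.toNat := by omega
      have htr : backCount cs (q - 1) = trail (cs.take q.toNat) := by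
        rw [← backCountN_eq_trail cs q.toNat (by omega)]
        unfold backCount
        congr 1
        omega
      by_cases heven : backCount cs (q - 1) % 2 = 0
      · rw [if_pos heven]
        simp only [true_iff]
        exact ⟨q.toNat, hiqn, hqlen, hgetq, by rw [← htr]; exact heven⟩
      · rw [if_neg heven]
        rw [ih (q + 1).toNat (by omega) (by omega)]
        constructor
        · rintro ⟨p, h1, h2, h3, h4⟩
          exact ⟨p, by omega, h2, h3, h4⟩
        · rintro ⟨p, h1, h2, h3, h4⟩
          refine ⟨p, ?_, h2, h3, h4⟩
          have hpq : ¬ p < q.toNat := fun hlt => hmin p h1 hlt h3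
          have hpne : p ≠ q.toNat := by
            intro he
            rw [he, ← htr] at h4
            exact heven h4
          omega

theorem loopA_iff (cs : List Char) :
    loopA cs 0 = true ↔
      ∃ p : Nat, p < cs.length ∧ cs[p]? = some '%' ∧ trail (cs.take p) % 2 = 0 := by
  rw [loopA, loopAGo_iff cs (cs.length + 1 - 0) 0 (by omega) (by omega)]
  constructor
  · rintro ⟨p, _, h2, h3, h4⟩; exact ⟨p, h2, h3, h4⟩
  · rintro ⟨p, h2, h3, h4⟩; exact ⟨p, Nat.zero_le _, h2, h3, h4⟩

theorem loopA_eq_loopB (cs : List Char) : loopA cs 0 = loopB cs 0 := by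
  rw [Bool.eq_iff_iff, loopA_iff, loopB_iff]
  constructor
  · rintro ⟨p, h2, h3, h4⟩
    refine ⟨p, h2, h3, ?_⟩
    rw [bsAt_eq_trail]
    split_ifs <;> simpa using h4
  · rintro ⟨p, h2, h3, h4⟩
    refine ⟨p, h2, h3, ?_⟩
    rw [bsAt_eq_trail] at h4
    revert h4
    split_ifs <;> simp

-- ===== VERDICT (by name: the statement is the Claim_ definition above) =====
theorem line_is_commented_py_spec : Claim_equal_line_is_commented_py := by
  intro txt idx _
  unfold Spec_line_is_commented_py line_is_commented_py line_is_commented_py_alt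
  exact loopA_eq_loopB _
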